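-- pv_equiv track=rewrite | github.com/t0r1n88/Lachesis | deviant/pochebut_va.py | calc_value_ea
-- ===== SOURCE A (Python) =====
-- def calc_value_ea(row):
--     """
--     Функция для подсчета значения
--     :return: число
--     """
--     lst_pr = [6,14,15,22,30,37,38,23]
--     value_forward = 0  # результат
--     for idx, value in enumerate(row,1):
--         if idx in lst_pr:
--             if idx != 23:
--                 if value == 1:
--                     value_forward += 1
--             else:
--                 if value == 0:
--                     value_forward += 1
--
--     return value_forward
-- ===== SOURCE B (Python) =====
-- def calc_value_ea(row):
--     lst = list(row)
--     n = len(lst)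
--     total = 0
--     for pos in (6, 14, 15, 22, 30, 37, 38):
--         if pos <= n and lst[pos - 1] == 1:
--             total += 1
--     if 23 <= n and lst[22] == 0:
--         total += 1
--     return total
-- ===== Notes on version B (the rewrite author's own statement) =====
-- stated objective: simpler
-- what changed: B loops over the seven fixed flag positions (plus special position 23) and indexes the row directly with a length guard, instead of scanning every element of the row and testing its 1-based index for membership in the position list.
import Mathlib
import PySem

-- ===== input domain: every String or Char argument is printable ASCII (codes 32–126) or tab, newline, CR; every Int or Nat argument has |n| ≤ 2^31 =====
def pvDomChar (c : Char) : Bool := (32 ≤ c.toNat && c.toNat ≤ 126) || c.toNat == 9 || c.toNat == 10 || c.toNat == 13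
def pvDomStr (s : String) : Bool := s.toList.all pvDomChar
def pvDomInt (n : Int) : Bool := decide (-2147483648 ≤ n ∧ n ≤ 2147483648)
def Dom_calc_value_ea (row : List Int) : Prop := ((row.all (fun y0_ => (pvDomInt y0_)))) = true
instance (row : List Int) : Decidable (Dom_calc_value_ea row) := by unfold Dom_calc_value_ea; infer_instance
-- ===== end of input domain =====

-- B iterates over the seven fixed flag positions (plus the special position 23) and indexes
-- the row directly, instead of scanning the whole row with a membership test: simpler and
-- independent of the row length beyond 38.

-- ===== PORT A =====
-- the for-loop over enumerate(row, 1), carrying (idx, accumulator)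
def calcLoopA (idx : Int) (l : List Int) (acc : Int) : Int :=
  match l with
  | [] => acc
  | v :: t =>
      calcLoopA (idx + 1) t
        (if idx ∈ ([6, 14, 15, 22, 30, 37, 38, 23] : List Int) then
          (if idx ≠ 23 then (if v = 1 then acc + 1 else acc)
           else (if v = 0 then acc + 1 else acc))
         else acc)

def calc_value_ea (row : List Int) : Int := calcLoopA 1 row 0

-- ===== PORT B =====
def calc_value_ea_alt (row : List Int) : Int :=
  let n := row.length
  let total :=
    ([6, 14, 15, 22, 30, 37, 38] : List Nat).foldl
      (fun acc pos => if pos ≤ n ∧ row.getD (pos - 1) 0 = 1 then acc + 1 else acc) 0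
  if 23 ≤ n ∧ row.getD 22 0 = 0 then total + 1 else total

-- ===== PRECONDITION & SPEC =====
def Spec_calc_value_ea (row : List Int) (out : Int) : Prop := out = calc_value_ea_alt row
instance (row : List Int) (out : Int) : Decidable (Spec_calc_value_ea row out) := by unfold Spec_calc_value_ea; infer_instance

-- ===== CLAIM (what is proved, stated in full; the proofs are below) =====
def Claim_equal_calc_value_ea : Prop := ∀ (row : List Int), Dom_calc_value_ea row → Spec_calc_value_ea row (calc_value_ea row)

-- ===== LEMMAS AND PROOFS =====

-- contribution of position p (1-based) to the count, for target value tv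
def posF (l : List Int) (k p : Nat) (tv : Int) : Int :=
  if k < p ∧ l[p - 1 - k]? = some tv then 1 else 0

theorem posF_zero (l : List Int) (k p : Nat) (tv : Int) (h : ¬ k < p) :
    posF l k p tv = 0 := by simp [posF, h]

theorem posF_nil (k p : Nat) (tv : Int) : posF [] k p tv = 0 := by
  simp [posF]

theorem posF_cons (v : Int) (t : List Int) (k p : Nat) (tv : Int) (hp : 1 ≤ p) :
    posF (v :: t) k p tv =
      if k + 1 = p then (if v = tv then 1 else 0) else posF t (k + 1) p tv := by
  unfold posF
  rcases Nat.lt_trichotomy (k + 1) p with h | h | h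
  · have h1 : p - 1 - k = (p - 1 - (k + 1)) + 1 := by omega
    rw [h1, List.getElem?_cons_succ]
    have hk : k < p := by omega
    have hne : k + 1 ≠ p := by omega
    simp [hk, h, hne]
  · subst h
    have h0 : k + 1 - 1 - k = 0 := by omega
    simp [h0]
  · have h1 : ¬ k < p := by omega
    have h2 : k + 1 ≠ p := by omega
    have h3 : ¬ k + 1 < p := by omega
    simp [h1, h2, h3]

-- the loop of A, characterised as the sum of the eight position contributions
theorem calcLoopA_eq (l : List Int) : ∀ (k : Nat) (acc : Int),
    calcLoopA ((k : Int) + 1) l acc =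
      acc + posF l k 6 1 + posF l k 14 1 + posF l k 15 1 + posF l k 22 1 +
        posF l k 23 0 + posF l k 30 1 + posF l k 37 1 + posF l k 38 1 := by
  induction l with
  | nil => intro k acc; simp [calcLoopA, posF_nil]
  | cons v t ih =>
    intro k acc
    have hmem : ((k : Int) + 1 ∈ ([6, 14, 15, 22, 30, 37, 38, 23] : List Int)) ↔
        (k + 1 = 6 ∨ k + 1 = 14 ∨ k + 1 = 15 ∨ k + 1 = 22 ∨ k + 1 = 30 ∨
         k + 1 = 37 ∨ k + 1 = 38 ∨ k + 1 = 23) := by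
      simp only [List.mem_cons, List.not_mem_nil, or_false]
      omega
    have hstep : calcLoopA ((k : Int) + 1) (v :: t) acc =
        calcLoopA ((k : Int) + 1 + 1) t
          (if (k : Int) + 1 ∈ ([6, 14, 15, 22, 30, 37, 38, 23] : List Int) then
            (if (k : Int) + 1 ≠ 23 then (if v = 1 then acc + 1 else acc)
             else (if v = 0 then acc + 1 else acc))
           else acc) := rfl
    have hcast : ((k : Int) + 1 + 1) = ((k + 1 : Nat) : Int) + 1 := by push_cast; ring
    rw [hstep, hcast, ih]
    rw [posF_cons v t k 6 1 (by omega), posF_cons v t k 14 1 (by omega),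
        posF_cons v t k 15 1 (by omega), posF_cons v t k 22 1 (by omega),
        posF_cons v t k 23 0 (by omega), posF_cons v t k 30 1 (by omega),
        posF_cons v t k 37 1 (by omega), posF_cons v t k 38 1 (by omega)]
    by_cases h6 : k + 1 = 6
    · have hm : (k : Int) + 1 ∈ ([6, 14, 15, 22, 30, 37, 38, 23] : List Int) := hmem.mpr (by omega)
      have hne : (k : Int) + 1 ≠ 23 := by omega
      simp only [if_pos hm, if_pos hne, if_pos h6]
      have : ¬ k + 1 = 14 := by omega
      simp only [if_neg this]
      have : ¬ k + 1 = 15 := by omega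
      simp only [if_neg this]
      have : ¬ k + 1 = 22 := by omega
      simp only [if_neg this]
      have : ¬ k + 1 = 23 := by omega
      simp only [if_neg this]
      have : ¬ k + 1 = 30 := by omega
      simp only [if_neg this]
      have : ¬ k + 1 = 37 := by omega
      simp only [if_neg this]
      have : ¬ k + 1 = 38 := by omega
      simp only [if_neg this]
      rw [posF_zero t (k + 1) 6 1 (by omega)]
      split_ifs <;> ring
    · by_cases h14 : k + 1 = 14
      · have hm : (k : Int) + 1 ∈ ([6, 14, 15, 22, 30, 37, 38, 23] : List Int) := hmem.mpr (by omega)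
        have hne : (k : Int) + 1 ≠ 23 := by omega
        simp only [if_pos hm, if_pos hne, if_pos h14, if_neg h6]
        have h1 : ¬ k + 1 = 15 := by omega
        have h2 : ¬ k + 1 = 22 := by omega
        have h3 : ¬ k + 1 = 23 := by omega
        have h4 : ¬ k + 1 = 30 := by omega
        have h5 : ¬ k + 1 = 37 := by omega
        have h7 : ¬ k + 1 = 38 := by omega
        simp only [if_neg h1, if_neg h2, if_neg h3, if_neg h4, if_neg h5, if_neg h7]
        rw [posF_zero t (k + 1) 14 1 (by omega)]
        split_ifs <;> ring
      · by_cases h15 : k + 1 = 15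
        · have hm : (k : Int) + 1 ∈ ([6, 14, 15, 22, 30, 37, 38, 23] : List Int) := hmem.mpr (by omega)
          have hne : (k : Int) + 1 ≠ 23 := by omega
          simp only [if_pos hm, if_pos hne, if_pos h15, if_neg h6, if_neg h14]
          have h2 : ¬ k + 1 = 22 := by omega
          have h3 : ¬ k + 1 = 23 := by omega
          have h4 : ¬ k + 1 = 30 := by omega
          have h5 : ¬ k + 1 = 37 := by omega
          have h7 : ¬ k + 1 = 38 := by omega
          simp only [if_neg h2, if_neg h3, if_neg h4, if_neg h5, if_neg h7]
          rw [posF_zero t (k + 1) 15 1 (by omega)]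
          split_ifs <;> ring
        · by_cases h22 : k + 1 = 22
          · have hm : (k : Int) + 1 ∈ ([6, 14, 15, 22, 30, 37, 38, 23] : List Int) := hmem.mpr (by omega)
            have hne : (k : Int) + 1 ≠ 23 := by omega
            simp only [if_pos hm, if_pos hne, if_pos h22, if_neg h6, if_neg h14, if_neg h15]
            have h3 : ¬ k + 1 = 23 := by omega
            have h4 : ¬ k + 1 = 30 := by omega
            have h5 : ¬ k + 1 = 37 := by omega
            have h7 : ¬ k + 1 = 38 := by omega
            simp only [if_neg h3, if_neg h4, if_neg h5, if_neg h7]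
            rw [posF_zero t (k + 1) 22 1 (by omega)]
            split_ifs <;> ring
          · by_cases h23 : k + 1 = 23
            · have hm : (k : Int) + 1 ∈ ([6, 14, 15, 22, 30, 37, 38, 23] : List Int) := hmem.mpr (by omega)
              have hne : ¬ ((k : Int) + 1 ≠ 23) := by omega
              simp only [if_pos hm, if_neg hne, if_pos h23, if_neg h6, if_neg h14, if_neg h15, if_neg h22]
              have h4 : ¬ k + 1 = 30 := by omega
              have h5 : ¬ k + 1 = 37 := by omega
              have h7 : ¬ k + 1 = 38 := by omega
              simp only [if_neg h4, if_neg h5, if_neg h7]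
              rw [posF_zero t (k + 1) 23 0 (by omega)]
              split_ifs <;> ring
            · by_cases h30 : k + 1 = 30
              · have hm : (k : Int) + 1 ∈ ([6, 14, 15, 22, 30, 37, 38, 23] : List Int) := hmem.mpr (by omega)
                have hne : (k : Int) + 1 ≠ 23 := by omega
                simp only [if_pos hm, if_pos hne, if_pos h30, if_neg h6, if_neg h14, if_neg h15, if_neg h22, if_neg h23]
                have h5 : ¬ k + 1 = 37 := by omega
                have h7 : ¬ k + 1 = 38 := by omega
                simp only [if_neg h5, if_neg h7]
                rw [posF_zero t (k + 1) 30 1 (by omega)]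
                split_ifs <;> ring
              · by_cases h37 : k + 1 = 37
                · have hm : (k : Int) + 1 ∈ ([6, 14, 15, 22, 30, 37, 38, 23] : List Int) := hmem.mpr (by omega)
                  have hne : (k : Int) + 1 ≠ 23 := by omega
                  simp only [if_pos hm, if_pos hne, if_pos h37, if_neg h6, if_neg h14, if_neg h15, if_neg h22, if_neg h23, if_neg h30]
                  have h7 : ¬ k + 1 = 38 := by omega
                  simp only [if_neg h7]
                  rw [posF_zero t (k + 1) 37 1 (by omega)]
                  split_ifs <;> ring
                · by_cases h38 : k + 1 = 38
                  · have hm : (k : Int) + 1 ∈ ([6, 14, 15, 22, 30, 37, 38, 23] : List Int) := hmem.mpr (by omega)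
                    have hne : (k : Int) + 1 ≠ 23 := by omega
                    simp only [if_pos hm, if_pos hne, if_pos h38, if_neg h6, if_neg h14, if_neg h15, if_neg h22, if_neg h23, if_neg h30, if_neg h37]
                    rw [posF_zero t (k + 1) 38 1 (by omega)]
                    split_ifs <;> ring
                  · have hm : ¬ ((k : Int) + 1 ∈ ([6, 14, 15, 22, 30, 37, 38, 23] : List Int)) := by
                      rw [hmem]; omega
                    simp only [if_neg hm, if_neg h6, if_neg h14, if_neg h15, if_neg h22, if_neg h23, if_neg h30, if_neg h37, if_neg h38]

theorem addIf (c : Prop) [Decidable c] (acc : Int) :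
    (if c then acc + 1 else acc) = acc + (if c then (1 : Int) else 0) := by
  split_ifs <;> ring

-- each term of B equals the corresponding position contribution at k = 0
theorem alt_term_eq (row : List Int) (p : Nat) (tv : Int) (hp : 1 ≤ p) :
    (if p ≤ row.length ∧ row.getD (p - 1) 0 = tv then (1 : Int) else 0) = posF row 0 p tv := by
  unfold posF
  by_cases h : p - 1 < row.length
  · have hplen : p ≤ row.length := by omega
    rw [List.getD_eq_getElem _ _ h]
    have h0 : 0 < p := hp
    simp [hplen, List.getElem?_eq_getElem h, h0]
  · have hplen : ¬ p ≤ row.length := by omega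
    have : row[p - 1]? = none := by
      rw [List.getElem?_eq_none_iff]; omega
    simp [hplen, this]

theorem alt_term23_eq (row : List Int) :
    (if 23 ≤ row.length ∧ row.getD 22 0 = 0 then (1 : Int) else 0) = posF row 0 23 0 := by
  unfold posF
  by_cases h : 22 < row.length
  · have hplen : 23 ≤ row.length := by omega
    rw [List.getD_eq_getElem _ _ h]
    simp [hplen, List.getElem?_eq_getElem h]
  · have hplen : ¬ 23 ≤ row.length := by omega
    have : row[22]? = none := by
      rw [List.getElem?_eq_none_iff]; omega
    simp [hplen, this]

theorem alt_eq_sum (row : List Int) :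
    calc_value_ea_alt row =
      0 + posF row 0 6 1 + posF row 0 14 1 + posF row 0 15 1 + posF row 0 22 1 +
        posF row 0 23 0 + posF row 0 30 1 + posF row 0 37 1 + posF row 0 38 1 := by
  unfold calc_value_ea_alt
  simp only [List.foldl_cons, List.foldl_nil, addIf]
  rw [alt_term_eq row 6 1 (by omega), alt_term_eq row 14 1 (by omega),
      alt_term_eq row 15 1 (by omega), alt_term_eq row 22 1 (by omega),
      alt_term_eq row 30 1 (by omega), alt_term_eq row 37 1 (by omega),
      alt_term_eq row 38 1 (by omega), alt_term23_eq row]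
  ring

-- ===== VERDICT (by name: the statement is the Claim_ definition above) =====
theorem calc_value_ea_spec : Claim_equal_calc_value_ea := by
  intro row _
  unfold Spec_calc_value_ea calc_value_ea
  have h := calcLoopA_eq row 0 0
  simp only [Nat.cast_zero, zero_add] at h
  rw [h, alt_eq_sum row]
  ring
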